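-- pv_equiv track=rewrite | github.com/davidetsm/Examens-Programacio | 2021-2022/2021/Parcial Grup 1/2021-12-3/ej1.py | kMinMax
-- ===== SOURCE A (Python) =====
-- def ordenarLista(lista):
--     for i in range(len(lista)):
--         menor = lista[i]
--         posicion = i
--         for j in range(i, len(lista)):
--             if lista[j] < menor:
--                 menor = lista[j]
--                 posicion = j
--         variable = lista[posicion]
--         lista[posicion] = lista[i]
--         lista[i] = variable
--
--     return lista
--
-- def kMinMax(lista, k):
--     if k > len(lista):
--         k = len(lista)
--     lista_copia = lista.copy()
--     ordenarLista(lista_copia)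
--     lista_solucion = []
--     for i in range(k):
--         lista_solucion.append(lista_copia[i])
--     lista_reverse = lista_copia[::-1]
--     for i in range(k):
--         lista_solucion.append(lista_reverse[i])
--     return lista_solucion
-- ===== SOURCE B (Python) =====
-- def _insert(s, x, desc):
--     # insert x into s (kept ordered ascending if not desc, descending if desc),
--     # after any elements comparing equal to x
--     i = 0
--     while i < len(s) and (x <= s[i] if desc else s[i] <= x):
--         i += 1
--     return s[:i] + [x] + s[i:]
--
-- def kMinMax(lista, k):
--     lows = []   # at most k smallest values, ascending
--     highs = []  # at most k largest values, descending
--     if k > 0: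
--         for x in lista:
--             if len(lows) < k or x < lows[-1]:
--                 lows = _insert(lows, x, False)[:k]
--             if len(highs) < k or x > highs[-1]:
--                 highs = _insert(highs, x, True)[:k]
--     return lows + highs
-- ===== Notes on version B (the rewrite author's own statement) =====
-- stated objective: alternative
-- what changed: Replaces A's full O(n^2) selection sort of a copy followed by two index loops with a single pass over the list that maintains two bounded ordered buffers (the k smallest ascending, the k largest descending) by bounded insertion, never sorting the whole list.
import Mathlib
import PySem

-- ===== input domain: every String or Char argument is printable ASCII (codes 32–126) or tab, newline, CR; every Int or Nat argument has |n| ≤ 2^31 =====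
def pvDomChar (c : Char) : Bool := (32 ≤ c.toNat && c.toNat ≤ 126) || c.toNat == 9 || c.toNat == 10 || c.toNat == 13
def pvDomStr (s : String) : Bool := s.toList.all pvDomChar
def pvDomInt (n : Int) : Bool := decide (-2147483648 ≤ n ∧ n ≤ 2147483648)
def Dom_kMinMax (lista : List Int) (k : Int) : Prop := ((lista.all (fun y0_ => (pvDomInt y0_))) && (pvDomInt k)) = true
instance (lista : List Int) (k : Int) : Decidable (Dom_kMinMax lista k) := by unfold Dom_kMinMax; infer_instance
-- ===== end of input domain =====

-- B replaces A's full selection sort by a single pass that maintains two bounded ordered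
-- buffers (the k smallest ascending, the k largest descending) via bounded insertion;
-- it never sorts the whole list (equivalence is about the return value; A mutates only a local copy).

-- ===== PORT A =====
-- inner loop of ordenarLista: for j in range(i, len(lista)), tracking (menor, posicion)
def selMin (l : List Int) (i : Int) : Int × Int :=
  (PySem.List.pyRange i (PySem.List.len l) 1).foldl
    (fun mp j => if PySem.List.pyGetD l j 0 < mp.1 then (PySem.List.pyGetD l j 0, j) else mp)
    (PySem.List.pyGetD l i 0, i)

-- one iteration of ordenarLista's outer loop: find the minimum from i, swap it to position i
-- (indices produced by the loops are in range, so pyGetD/pySetD are exact here)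
def selStep (l : List Int) (i : Int) : List Int :=
  let mp := selMin l i
  let variable_ := PySem.List.pyGetD l mp.2 0
  let l1 := PySem.List.pySetD l mp.2 (PySem.List.pyGetD l i 0)
  PySem.List.pySetD l1 i variable_

def ordenarLista (lista : List Int) : List Int :=
  (PySem.List.pyRange 0 (PySem.List.len lista) 1).foldl selStep lista

def kMinMax (lista : List Int) (k : Int) : List Int :=
  let k1 := if k > PySem.List.len lista then PySem.List.len lista else k
  let copia := ordenarLista lista
  let sol1 := (PySem.List.pyRange 0 k1 1).foldl
    (fun acc i => acc ++ [PySem.List.pyGetD copia i 0]) []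
  let rev := (PySem.List.slice? copia none none (-1)).getD []
  (PySem.List.pyRange 0 k1 1).foldl
    (fun acc i => acc ++ [PySem.List.pyGetD rev i 0]) sol1

-- ===== PORT B =====
-- _insert(s, x, desc): the left-to-right while scan ported as structural recursion on s
-- (s[:i] + [x] + s[i:] is built incrementally; same values at every step)
def insHelper : List Int → Int → Bool → List Int
  | [], x, _ => [x]
  | y :: t, x, desc =>
      if (if desc then x ≤ y else y ≤ x) then y :: insHelper t x desc else x :: y :: t

-- body of B's for-loop: update the two bounded buffers for one element x
-- (lows[-1]/highs[-1] are only reached by Python when the buffer is nonempty, so pyGetD is exact)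
def kmmStep (k : Int) (st : List Int × List Int) (x : Int) : List Int × List Int :=
  let lows := st.1
  let highs := st.2
  let lows' := if PySem.List.len lows < k ∨ x < PySem.List.pyGetD lows (-1) 0
    then PySem.List.slice (insHelper lows x false) none (some k) else lows
  let highs' := if PySem.List.len highs < k ∨ PySem.List.pyGetD highs (-1) 0 < x
    then PySem.List.slice (insHelper highs x true) none (some k) else highs
  (lows', highs')

def kMinMax_alt (lista : List Int) (k : Int) : List Int :=
  let p := if k > 0 then lista.foldl (kmmStep k) ([], []) else (([] : List Int), ([] : List Int))
  p.1 ++ p.2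

-- ===== PRECONDITION & SPEC =====
def Spec_kMinMax (lista : List Int) (k : Int) (out : List Int) : Prop := out = kMinMax_alt lista k
instance (lista : List Int) (k : Int) (out : List Int) : Decidable (Spec_kMinMax lista k out) := by unfold Spec_kMinMax; infer_instance

-- ===== CLAIM (what is proved, stated in full; the proofs are below) =====
def Claim_equal_kMinMax : Prop := ∀ (lista : List Int) (k : Int), Dom_kMinMax lista k → Spec_kMinMax lista k (kMinMax lista k)

-- ===== LEMMAS AND PROOFS =====

-- ---------- A side: kMinMax computes take k1 of the sorted list ++ take k1 of its reverse ----------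

theorem map_getD_range_eq_take (xs : List Int) (m : Nat) (hm : m ≤ xs.length) :
    (List.range m).map (fun i => xs.getD i 0) = xs.take m := by
  apply List.ext_getElem
  · simp [hm]
  · intro i h1 h2
    simp at h1
    simp [List.getElem_take, List.getD_eq_getElem?_getD, List.getElem?_eq_getElem (by omega : i < xs.length)]

theorem head_swap_perm : ∀ (t : List Int) (p : Nat) (x : Int), p < t.length →
    (t.getD p 0 :: t.set p x).Perm (x :: t) := by
  intro t
  induction t with
  | nil => intro p x h; simp at h
  | cons y t ih =>
    intro p x h
    cases p with
    | zero => simpa using List.Perm.swap x y t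
    | succ q =>
      simp only [List.getD_cons_succ, List.set_cons_succ]
      exact (List.Perm.swap _ _ _).trans (((ih q x (by simpa using h)).cons y).trans (List.Perm.swap _ _ _))

theorem swap_perm : ∀ (l : List Int) (i p : Nat), i ≤ p → p < l.length →
    ((l.set p (l.getD i 0)).set i (l.getD p 0)).Perm l := by
  intro l
  induction l with
  | nil => intro i p _ h; simp at h
  | cons x t ih =>
    intro i p hip h
    cases i with
    | zero =>
      cases p with
      | zero => simp
      | succ q =>
        simp only [List.getD_cons_zero, List.set_cons_succ, List.getD_cons_succ, List.set_cons_zero]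
        exact head_swap_perm t q x (by simpa using h)
    | succ i' =>
      cases p with
      | zero => omega
      | succ q =>
        simp only [List.getD_cons_succ, List.set_cons_succ]
        exact (ih i' q (by omega) (by simpa using h)).cons x

theorem foldl_app {α β : Type} (f : α → β) : ∀ (l : List α) (acc : List β),
    l.foldl (fun a x => a ++ [f x]) acc = acc ++ l.map f := by
  intro l
  induction l with
  | nil => simp
  | cons x t ih => intro acc; simp [ih]

theorem fold_build (xs : List Int) (b : Int) (hb : b ≤ xs.length) (acc : List Int) :
    (PySem.List.pyRange 0 b 1).foldl (fun acc i => acc ++ [PySem.List.pyGetD xs i 0]) acc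
      = acc ++ xs.take b.toNat := by
  rcases le_or_gt b 0 with h|h
  · rw [PySem.List.pyRange_one_eq_nil h]
    simp [Int.toNat_of_nonpos h]
  · rw [PySem.List.pyRange_one, List.foldl_map,
      foldl_app (fun k : Nat => PySem.List.pyGetD xs ((0:Int) + (k:Int)) 0)]
    have : ((List.range (b - 0).toNat).map fun k : Nat => PySem.List.pyGetD xs ((0:Int) + (k:Int)) 0)
        = xs.take b.toNat := by
      rw [← map_getD_range_eq_take xs b.toNat (by omega)]
      simp only [sub_zero]
      apply List.map_congr_left
      intro k _
      simp
    rw [this]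

theorem selMin_spec (l : List Int) :
    ∀ (cnt : Nat) (a m p : Int), ((l.length : Int) - a).toNat = cnt → 0 ≤ a →
    0 ≤ p → p < l.length → m = l.getD p.toNat 0 →
    let r := (PySem.List.pyRange a (PySem.List.len l) 1).foldl
      (fun mp j => if PySem.List.pyGetD l j 0 < mp.1 then (PySem.List.pyGetD l j 0, j) else mp) (m, p)
    0 ≤ r.2 ∧ r.2 < l.length ∧ r.1 = l.getD r.2.toNat 0 ∧ r.1 ≤ m ∧
      (r.2 = p ∨ a ≤ r.2) ∧ (∀ j : Int, a ≤ j → j < l.length → r.1 ≤ l.getD j.toNat 0) := by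
  intro cnt
  induction cnt with
  | zero =>
    intro a m p hcnt ha0 hp0 hp1 hm
    have hnil : PySem.List.pyRange a (PySem.List.len l) 1 = [] := by
      apply PySem.List.pyRange_one_eq_nil
      simp [PySem.List.len]
      omega
    simp only [hnil, List.foldl_nil]
    refine ⟨hp0, hp1, hm, le_refl _, ?_, ?_⟩
    · exact Or.inl trivial
    intro j hj1 hj2; omega
  | succ cnt ih =>
    intro a m p hcnt ha0 hp0 hp1 hm
    have ha : a < (l.length : Int) := by omega
    have hcons : PySem.List.pyRange a (PySem.List.len l) 1
        = a :: PySem.List.pyRange (a+1) (PySem.List.len l) 1 := by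
      have := PySem.List.pyRange_one_cons (a := a) (b := (PySem.List.len l)) (by simpa [PySem.List.len] using ha)
      simpa [PySem.List.len] using this
    rw [hcons]
    simp only [List.foldl_cons]
    have hlen : a.toNat < l.length := by omega
    have hg : PySem.List.pyGetD l a 0 = l.getD a.toNat 0 := by
      have ha' : ((a.toNat : Nat) : Int) = a := by omega
      rw [← ha', PySem.List.pyGetD_natCast]
      simp
      rw [show max a 0 = a from max_eq_left ha0]
    by_cases hlt : PySem.List.pyGetD l a 0 < m
    · rw [if_pos hlt]
      obtain ⟨h1, h2, h3, h4, h5, h6⟩ :=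
        ih (a+1) (PySem.List.pyGetD l a 0) a (by omega) (by omega) ha0 ha hg
      refine ⟨h1, h2, h3, le_trans h4 (le_of_lt hlt), ?_, ?_⟩
      · right
        rcases h5 with h|h <;> omega
      · intro j hj1 hj2
        rcases eq_or_lt_of_le hj1 with he|hl2
        · rw [← he]
          exact hg ▸ h4
        · exact h6 j (by omega) hj2
    · rw [if_neg hlt]
      obtain ⟨h1, h2, h3, h4, h5, h6⟩ := ih (a+1) m p (by omega) (by omega) hp0 hp1 hm
      refine ⟨h1, h2, h3, h4, ?_, ?_⟩
      · rcases h5 with h|h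
        · exact Or.inl h
        · exact Or.inr (by omega)
      · intro j hj1 hj2
        rcases eq_or_lt_of_le hj1 with he|hl2
        · rw [← he]
          calc _ ≤ m := h4
            _ ≤ l.getD a.toNat 0 := hg ▸ le_of_not_gt hlt
        · exact h6 j (by omega) hj2

def SelInv (l : List Int) (i : Nat) : Prop :=
  (l.take i).Pairwise (· ≤ ·) ∧ ∀ a ∈ l.take i, ∀ b ∈ l.drop i, a ≤ b

theorem getD_eq_getElem' (l : List Int) (n : Nat) (h : n < l.length) : l.getD n 0 = l[n] := by
  rw [List.getD_eq_getElem?_getD, List.getElem?_eq_getElem h]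
  rfl

theorem set_take_eq (l : List Int) (i p : Nat) (a b : Int) (hip : i ≤ p) :
    ((l.set p a).set i b).take i = l.take i := by
  apply List.ext_getElem (by simp)
  intro j h1 h2
  simp only [List.getElem_take, List.getElem_set]
  rw [if_neg (by simp at h1; omega), if_neg (by simp at h1; omega)]

theorem set_take_succ (l : List Int) (i p : Nat) (a b : Int) (hip : i ≤ p) (hp : p < l.length) :
    ((l.set p a).set i b).take (i+1) = l.take i ++ [b] := by
  rw [List.take_add_one, set_take_eq l i p a b hip]
  congr 1
  have hi' : i < ((l.set p a).set i b).length := by simp; omega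
  rw [List.getElem?_eq_getElem hi']
  simp

theorem selStep_inv (l : List Int) (i : Nat) (hi : i < l.length) (hInv : SelInv l i) :
    (selStep l (i : Int)).Perm l ∧ SelInv (selStep l (i : Int)) (i + 1) ∧
      (selStep l (i : Int)).length = l.length := by
  have hspec := selMin_spec l ((l.length : Int) - (i : Int)).toNat (i : Int) (l.getD i 0) (i : Int)
    rfl (by omega) (by omega) (by exact_mod_cast hi) (by simp)
  have hsel : selMin l (i : Int) = (PySem.List.pyRange (i : Int) (PySem.List.len l) 1).foldl
      (fun mp j => if PySem.List.pyGetD l j 0 < mp.1 then (PySem.List.pyGetD l j 0, j) else mp)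
      (l.getD i 0, (i : Int)) := by
    simp [selMin]
  rw [← hsel] at hspec
  obtain ⟨h1, h2, h3, h4, h5, h6⟩ := hspec
  set m0 := (selMin l (i : Int)).1 with hm0
  set p0 := (selMin l (i : Int)).2 with hp0
  set pN := p0.toNat with hpN
  have hip : i ≤ pN := by rcases h5 with h|h <;> omega
  have hpl : pN < l.length := by omega
  -- the step is the two-set swap
  have hstep : selStep l (i : Int) = (l.set pN (l.getD i 0)).set i (l.getD pN 0) := by
    show PySem.List.pySetD (PySem.List.pySetD l p0 (PySem.List.pyGetD l (i : Int) 0)) (i : Int)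
        (PySem.List.pyGetD l p0 0) = _
    have hg1 : PySem.List.pyGetD l (i : Int) 0 = l.getD i 0 := by simp
    have hp0' : ((pN : Nat) : Int) = p0 := by omega
    have hg2 : PySem.List.pyGetD l p0 0 = l.getD pN 0 := by
      rw [← hp0', PySem.List.pyGetD_natCast]
    rw [hg1, hg2, ← hp0', PySem.List.pySetD_natCast, PySem.List.pySetD_natCast]
  have hmin : ∀ b ∈ l.drop i, m0 ≤ b := by
    intro b hb
    obtain ⟨jN, hj, hjb⟩ := List.mem_iff_getElem.mp hb
    rw [List.getElem_drop] at hjb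
    have hjl : i + jN < l.length := by simp at hj; omega
    have h7 := h6 ((i + jN : Nat) : Int) (by omega) (by exact_mod_cast hjl)
    rw [Int.toNat_natCast] at h7
    rw [← hjb, ← getD_eq_getElem' l (i+jN) hjl]
    exact h7
  have hm0drop : m0 ∈ l.drop i := by
    have he : (l.drop i)[pN - i]'(by simp; omega) = m0 := by
      rw [List.getElem_drop, h3, getD_eq_getElem' l pN (by omega)]
      congr 1
      omega
    rw [← he]
    exact List.getElem_mem _
  rw [hstep]
  have hperm : ((l.set pN (l.getD i 0)).set i (l.getD pN 0)).Perm l := swap_perm l i pN hip hpl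
  refine ⟨hperm, ⟨?_, ?_⟩, by simp⟩
  · -- pairwise of take (i+1)
    rw [set_take_succ l i pN _ _ hip hpl]
    rw [List.pairwise_append]
    refine ⟨hInv.1, List.pairwise_singleton _ _, ?_⟩
    intro a ha b hb
    rw [List.mem_singleton] at hb
    subst hb
    have : l.getD pN 0 = m0 := by rw [h3]
    rw [this]
    exact hInv.2 a ha m0 hm0drop
  · -- cross property at i+1
    intro a ha b hb
    have htake : ((l.set pN (l.getD i 0)).set i (l.getD pN 0)).take (i+1) = l.take i ++ [m0] := by
      rw [set_take_succ l i pN _ _ hip hpl, h3]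
    have hkey : (m0 :: ((l.set pN (l.getD i 0)).set i (l.getD pN 0)).drop (i+1)).Perm (l.drop i) := by
      have h : (List.take (i+1) ((l.set pN (l.getD i 0)).set i (l.getD pN 0)) ++
          List.drop (i+1) ((l.set pN (l.getD i 0)).set i (l.getD pN 0))).Perm
          (l.take i ++ l.drop i) := by
        rw [List.take_append_drop, List.take_append_drop]
        exact hperm
      rw [htake, List.append_assoc] at h
      exact (List.perm_append_left_iff _).mp h
    have hbdrop : b ∈ l.drop i := hkey.mem_iff.mp (List.mem_cons_of_mem _ hb)
    rw [htake] at ha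
    rcases List.mem_append.mp ha with h|h
    · exact hInv.2 a h b hbdrop
    · rw [List.mem_singleton] at h
      subst h
      exact hmin b hbdrop

theorem outer_loop (n : Nat) : ∀ (cnt : Nat) (l : List Int) (a : Int),
    l.length = n → 0 ≤ a → ((n : Int) - a).toNat = cnt → SelInv l a.toNat →
    ((PySem.List.pyRange a (n : Int) 1).foldl selStep l).Perm l ∧
      ((PySem.List.pyRange a (n : Int) 1).foldl selStep l).Pairwise (· ≤ ·) := by
  intro cnt
  induction cnt with
  | zero =>
    intro l a hlen ha0 hcnt hInv
    rw [PySem.List.pyRange_one_eq_nil (by omega)]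
    refine ⟨List.Perm.refl l, ?_⟩
    have : l.take a.toNat = l := List.take_of_length_le (by omega)
    simpa [this] using hInv.1
  | succ cnt ih =>
    intro l a hlen ha0 hcnt hInv
    have han : a < (n : Int) := by omega
    rw [PySem.List.pyRange_one_cons han, List.foldl_cons]
    have haa : ((a.toNat : Nat) : Int) = a := by omega
    have hstep := selStep_inv l a.toNat (by omega) hInv
    rw [haa] at hstep
    obtain ⟨hperm, hInv', hlen'⟩ := hstep
    have hInv'' : SelInv (selStep l a) (a+1).toNat := by
      have : (a+1).toNat = a.toNat + 1 := by omega
      rw [this]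
      exact hInv'
    obtain ⟨hP, hS⟩ := ih (selStep l a) (a+1) (by omega) (by omega) (by omega) hInv''
    exact ⟨hP.trans hperm, hS⟩

theorem ordenarLista_eq (l : List Int) :
    ordenarLista l = PySem.List.sorted l (fun x => x) false := by
  have hInv0 : SelInv l (0 : Int).toNat := by
    constructor
    · simp
    · intro a ha
      simp at ha
  obtain ⟨hP, hS⟩ := outer_loop l.length l.length l 0 rfl (le_refl 0) (by omega) hInv0
  have : ordenarLista l = (PySem.List.pyRange 0 ((l.length : Nat) : Int) 1).foldl selStep l := by
    simp [ordenarLista, PySem.List.len]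
  rw [this]
  exact (PySem.List.sorted_id_eq_of_perm_of_pairwise _ _ hP hS).symm

-- A's result in closed form
theorem kMinMax_A_char (lista : List Int) (k : Int) :
    kMinMax lista k =
      (PySem.List.sorted lista (fun x => x) false).take
        (if k > (lista.length : Int) then (lista.length : Int) else k).toNat ++
      (PySem.List.sorted lista (fun x => x) false).reverse.take
        (if k > (lista.length : Int) then (lista.length : Int) else k).toNat := by
  have hlen : PySem.List.len lista = (lista.length : Int) := by simp
  have hS : (PySem.List.sorted lista (fun x => x) false).length = lista.length :=
    (PySem.List.sorted_perm lista (fun x => x) false).length_eq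
  show (PySem.List.pyRange 0 (if k > PySem.List.len lista then PySem.List.len lista else k) 1).foldl
      (fun acc i => acc ++
        [PySem.List.pyGetD ((PySem.List.slice? (ordenarLista lista) none none (-1)).getD []) i 0])
      ((PySem.List.pyRange 0 (if k > PySem.List.len lista then PySem.List.len lista else k) 1).foldl
        (fun acc i => acc ++ [PySem.List.pyGetD (ordenarLista lista) i 0]) []) = _
  rw [ordenarLista_eq, PySem.List.slice?_none_none_neg_one]
  set S := PySem.List.sorted lista (fun x => x) false with hSdef
  rw [hlen]
  set k1 := if k > ((lista.length : Nat) : Int) then ((lista.length : Nat) : Int) else k with hk1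
  have hk1le : k1 ≤ (S.length : Int) := by rw [hk1, hS]; split_ifs <;> omega
  rw [Option.getD_some]
  rw [fold_build S k1 hk1le []]
  rw [fold_build S.reverse k1 (by simpa using hk1le) (([] : List Int) ++ S.take k1.toNat)]
  simp

-- ---------- B side ----------

theorem insHelper_false (x y : Int) (t : List Int) :
    insHelper (y :: t) x false = if y ≤ x then y :: insHelper t x false else x :: y :: t := by
  simp [insHelper]

theorem insHelper_true (x y : Int) (t : List Int) :
    insHelper (y :: t) x true = if x ≤ y then y :: insHelper t x true else x :: y :: t := by
  simp [insHelper]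

theorem insHelper_perm (x : Int) (d : Bool) : ∀ l : List Int, (insHelper l x d).Perm (x :: l) := by
  intro l
  induction l with
  | nil => simp [insHelper]
  | cons y t ih =>
    simp only [insHelper]
    split_ifs
    all_goals first
      | exact List.Perm.refl _
      | exact (ih.cons y).trans ((List.Perm.swap x y t).symm)
      | exact (ih.cons y).trans (List.Perm.swap x y t)

theorem take_cons_take (y : Int) (t : List Int) (m : Nat) :
    List.take m (y :: List.take m t) = List.take m (y :: t) := by
  cases m with
  | zero => simp
  | succ m' =>
    simp only [List.take_succ_cons, List.take_take, Nat.min_eq_left (Nat.le_succ m')]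

theorem insHelper_take (x : Int) (d : Bool) :
    ∀ (l : List Int) (K : Nat), (insHelper (l.take K) x d).take K = (insHelper l x d).take K := by
  intro l
  induction l with
  | nil => intro K; simp
  | cons y t ih =>
    intro K
    cases K with
    | zero => simp
    | succ m =>
      simp only [List.take_succ_cons, insHelper]
      by_cases h : (if d = true then x ≤ y else y ≤ x)
      · rw [if_pos h, if_pos h]
        simp only [List.take_succ_cons]
        rw [ih m]
      · rw [if_neg h, if_neg h]
        simp only [List.take_succ_cons]
        congr 1
        exact take_cons_take y t m

-- if every element of l is ≤ x (asc) / ≥ x (desc), the scan runs off the end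
theorem insHelper_all_le (x : Int) : ∀ l : List Int, (∀ e ∈ l, e ≤ x) →
    insHelper l x false = l ++ [x] := by
  intro l
  induction l with
  | nil => intro _; simp [insHelper]
  | cons y t ih =>
    intro h
    rw [insHelper_false, if_pos (h y (List.mem_cons_self))]
    rw [ih (fun e he => h e (List.mem_cons_of_mem y he))]
    simp

theorem insHelper_all_ge (x : Int) : ∀ l : List Int, (∀ e ∈ l, x ≤ e) →
    insHelper l x true = l ++ [x] := by
  intro l
  induction l with
  | nil => intro _; simp [insHelper]
  | cons y t ih =>
    intro h
    rw [insHelper_true, if_pos (h y (List.mem_cons_self))]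
    rw [ih (fun e he => h e (List.mem_cons_of_mem y he))]
    simp

theorem insHelper_pairwise_asc (x : Int) : ∀ l : List Int, l.Pairwise (· ≤ ·) →
    (insHelper l x false).Pairwise (· ≤ ·) := by
  intro l
  induction l with
  | nil => intro _; simp [insHelper]
  | cons y t ih =>
    intro h
    rw [List.pairwise_cons] at h
    rw [insHelper_false]
    split_ifs with hyx
    · rw [List.pairwise_cons]
      refine ⟨?_, ih h.2⟩
      intro e he
      rcases List.mem_cons.mp ((insHelper_perm x false t).mem_iff.mp he) with h'|h'
      · omega
      · exact h.1 e h'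
    · simp at hyx
      rw [List.pairwise_cons]
      refine ⟨?_, List.pairwise_cons.mpr h⟩
      intro e he
      rcases List.mem_cons.mp he with h'|h'
      · omega
      · have := h.1 e h'; omega

theorem insHelper_pairwise_desc (x : Int) : ∀ l : List Int, l.Pairwise (fun a b => b ≤ a) →
    (insHelper l x true).Pairwise (fun a b => b ≤ a) := by
  intro l
  induction l with
  | nil => intro _; simp [insHelper]
  | cons y t ih =>
    intro h
    rw [List.pairwise_cons] at h
    rw [insHelper_true]
    split_ifs with hyx
    · rw [List.pairwise_cons]
      refine ⟨?_, ih h.2⟩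
      intro e he
      rcases List.mem_cons.mp ((insHelper_perm x true t).mem_iff.mp he) with h'|h'
      · omega
      · exact h.1 e h'
    · simp at hyx
      rw [List.pairwise_cons]
      refine ⟨?_, List.pairwise_cons.mpr h⟩
      intro e he
      rcases List.mem_cons.mp he with h'|h'
      · omega
      · have := h.1 e h'; omega

theorem mem_le_getLast : ∀ (l : List Int), l.Pairwise (· ≤ ·) → ∀ e ∈ l, ∀ z, l.getLast? = some z → e ≤ z := by
  intro l
  induction l with
  | nil => intro _ e he; simp at he
  | cons y t ih =>
    intro h e he z hz
    rw [List.pairwise_cons] at h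
    cases t with
    | nil =>
      simp at hz he
      omega
    | cons w t' =>
      rw [List.getLast?_cons_cons] at hz
      have hzmem : z ∈ w :: t' := List.mem_of_getLast? hz
      rcases List.mem_cons.mp he with h'|h'
      · subst h'
        exact h.1 z hzmem
      · exact ih h.2 e h' z hz

theorem mem_ge_getLast : ∀ (l : List Int), l.Pairwise (fun a b => b ≤ a) → ∀ e ∈ l, ∀ z, l.getLast? = some z → z ≤ e := by
  intro l
  induction l with
  | nil => intro _ e he; simp at he
  | cons y t ih =>
    intro h e he z hz
    rw [List.pairwise_cons] at h
    cases t with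
    | nil =>
      simp at hz he
      omega
    | cons w t' =>
      rw [List.getLast?_cons_cons] at hz
      have hzmem : z ∈ w :: t' := List.mem_of_getLast? hz
      rcases List.mem_cons.mp he with h'|h'
      · subst h'
        exact h.1 z hzmem
      · exact ih h.2 e h' z hz

-- one loop iteration, stated on truncations of the "full" buffers
theorem kmmStep_eq (k : Int) (hk : 0 < k) (x : Int) (s d : List Int)
    (hs : s.Pairwise (· ≤ ·)) (hd : d.Pairwise (fun a b => b ≤ a)) :
    kmmStep k (s.take k.toNat, d.take k.toNat) x
      = ((insHelper s x false).take k.toNat, (insHelper d x true).take k.toNat) := by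
  have hK1 : 1 ≤ k.toNat := by omega
  have hlow : (if PySem.List.len (s.take k.toNat) < k ∨
        x < PySem.List.pyGetD (s.take k.toNat) (-1) 0
      then PySem.List.slice (insHelper (s.take k.toNat) x false) none (some k)
      else s.take k.toNat) = (insHelper s x false).take k.toNat := by
    split_ifs with h
    · rw [PySem.List.slice_to _ (le_of_lt hk), insHelper_take]
    · push_neg at h
      obtain ⟨h1, h2⟩ := h
      have hlen : (s.take k.toNat).length = k.toNat := by
        simp [PySem.List.len] at h1
        simp
        omega
      have hne : s.take k.toNat ≠ [] := by
        intro hc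
        rw [hc] at hlen
        simp at hlen
        omega
      rcases hz : (s.take k.toNat).getLast? with _ | z
      · rw [List.getLast?_eq_none_iff] at hz
        exact absurd hz hne
      have hzx : z ≤ x := by
        have : PySem.List.pyGetD (s.take k.toNat) (-1) 0 = z := by
          simp [PySem.List.pyGetD, PySem.List.pyGet?_neg_one, hz]
        omega
      have hall : ∀ e ∈ s.take k.toNat, e ≤ x := by
        intro e he
        exact le_trans (mem_le_getLast _ (hs.sublist (List.take_sublist _ _)) e he z hz) hzx
      rw [← insHelper_take, insHelper_all_le x _ hall]
      have htl : ((s.take k.toNat) ++ [x]).take (s.take k.toNat).length = s.take k.toNat := List.take_left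
      rw [hlen] at htl
      rw [htl]
  have hhigh : (if PySem.List.len (d.take k.toNat) < k ∨
        PySem.List.pyGetD (d.take k.toNat) (-1) 0 < x
      then PySem.List.slice (insHelper (d.take k.toNat) x true) none (some k)
      else d.take k.toNat) = (insHelper d x true).take k.toNat := by
    split_ifs with h
    · rw [PySem.List.slice_to _ (le_of_lt hk), insHelper_take]
    · push_neg at h
      obtain ⟨h1, h2⟩ := h
      have hlen : (d.take k.toNat).length = k.toNat := by
        simp [PySem.List.len] at h1
        simp
        omega
      have hne : d.take k.toNat ≠ [] := by
        intro hc
        rw [hc] at hlen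
        simp at hlen
        omega
      rcases hz : (d.take k.toNat).getLast? with _ | z
      · rw [List.getLast?_eq_none_iff] at hz
        exact absurd hz hne
      have hzx : x ≤ z := by
        have : PySem.List.pyGetD (d.take k.toNat) (-1) 0 = z := by
          simp [PySem.List.pyGetD, PySem.List.pyGet?_neg_one, hz]
        omega
      have hall : ∀ e ∈ d.take k.toNat, x ≤ e := by
        intro e he
        exact le_trans hzx (mem_ge_getLast _ (hd.sublist (List.take_sublist _ _)) e he z hz)
      rw [← insHelper_take, insHelper_all_ge x _ hall]
      have htl : ((d.take k.toNat) ++ [x]).take (d.take k.toNat).length = d.take k.toNat := List.take_left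
      rw [hlen] at htl
      rw [htl]
  show (_, _) = _
  rw [← hlow, ← hhigh]

theorem fold_inv (k : Int) (hk : 0 < k) : ∀ (xs s d : List Int),
    s.Pairwise (· ≤ ·) → d.Pairwise (fun a b => b ≤ a) →
    xs.foldl (kmmStep k) (s.take k.toNat, d.take k.toNat)
      = ((xs.foldl (fun acc x => insHelper acc x false) s).take k.toNat,
         (xs.foldl (fun acc x => insHelper acc x true) d).take k.toNat) := by
  intro xs
  induction xs with
  | nil => intro s d _ _; rfl
  | cons x t ih =>
    intro s d hs hd
    simp only [List.foldl_cons]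
    rw [kmmStep_eq k hk x s d hs hd]
    exact ih _ _ (insHelper_pairwise_asc x s hs) (insHelper_pairwise_desc x d hd)

theorem foldl_ins_perm (d : Bool) : ∀ (xs s : List Int),
    (xs.foldl (fun acc x => insHelper acc x d) s).Perm (s ++ xs) := by
  intro xs
  induction xs with
  | nil => intro s; simp
  | cons x t ih =>
    intro s
    simp only [List.foldl_cons]
    refine (ih (insHelper s x d)).trans ?_
    refine (List.Perm.append_right t (insHelper_perm x d s)).trans ?_
    have : (s ++ x :: t).Perm (x :: (s ++ t)) := List.perm_middle
    exact this.symm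

theorem foldl_ins_pairwise_asc : ∀ (xs s : List Int), s.Pairwise (· ≤ ·) →
    (xs.foldl (fun acc x => insHelper acc x false) s).Pairwise (· ≤ ·) := by
  intro xs
  induction xs with
  | nil => intro s h; exact h
  | cons x t ih =>
    intro s h
    exact ih _ (insHelper_pairwise_asc x s h)

theorem foldl_ins_pairwise_desc : ∀ (xs s : List Int), s.Pairwise (fun a b => b ≤ a) →
    (xs.foldl (fun acc x => insHelper acc x true) s).Pairwise (fun a b => b ≤ a) := by
  intro xs
  induction xs with
  | nil => intro s h; exact h
  | cons x t ih =>
    intro s h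
    exact ih _ (insHelper_pairwise_desc x s h)

theorem fullAsc_eq_sorted (lista : List Int) :
    lista.foldl (fun acc x => insHelper acc x false) [] = PySem.List.sorted lista (fun x => x) false := by
  refine (PySem.List.sorted_id_eq_of_perm_of_pairwise _ _ ?_ ?_).symm
  · simpa using foldl_ins_perm false lista []
  · exact foldl_ins_pairwise_asc lista [] (by simp)

theorem fullDesc_eq_sorted_rev (lista : List Int) :
    lista.foldl (fun acc x => insHelper acc x true) [] = (PySem.List.sorted lista (fun x => x) false).reverse := by
  have h : PySem.List.sorted lista (fun x => x) false
      = (lista.foldl (fun acc x => insHelper acc x true) []).reverse := by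
    refine PySem.List.sorted_id_eq_of_perm_of_pairwise _ _ ?_ ?_
    · refine (List.reverse_perm _).trans ?_
      simpa using foldl_ins_perm true lista []
    · rw [List.pairwise_reverse]
      exact foldl_ins_pairwise_desc lista [] (by simp)
  rw [h, List.reverse_reverse]

theorem kMinMax_alt_char (lista : List Int) (k : Int) (hk : 0 < k) :
    kMinMax_alt lista k =
      (PySem.List.sorted lista (fun x => x) false).take k.toNat ++
      (PySem.List.sorted lista (fun x => x) false).reverse.take k.toNat := by
  show (if k > 0 then lista.foldl (kmmStep k) ([], []) else (([] : List Int), ([] : List Int))).1 ++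
      (if k > 0 then lista.foldl (kmmStep k) ([], []) else (([] : List Int), ([] : List Int))).2 = _
  rw [if_pos hk]
  have h0 : (([] : List Int), ([] : List Int))
      = (([] : List Int).take k.toNat, ([] : List Int).take k.toNat) := by simp
  rw [h0, fold_inv k hk lista [] [] (by simp) (by simp),
    fullAsc_eq_sorted, fullDesc_eq_sorted_rev]

theorem kMinMax_eq_alt (lista : List Int) (k : Int) : kMinMax lista k = kMinMax_alt lista k := by
  rw [kMinMax_A_char]
  set S := PySem.List.sorted lista (fun x => x) false with hSdef
  have hS : S.length = lista.length := (PySem.List.sorted_perm lista (fun x => x) false).length_eq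
  rcases le_or_gt k 0 with hk|hk
  · have h1 : (if k > (lista.length : Int) then (lista.length : Int) else k) = k := by
      rw [if_neg (by omega)]
    rw [h1, Int.toNat_of_nonpos hk]
    show ([] : List Int) ++ [] = _
    have : kMinMax_alt lista k = (([] : List Int), ([] : List Int)).1 ++ (([] : List Int), ([] : List Int)).2 := by
      show (if k > 0 then lista.foldl (kmmStep k) ([], []) else (([] : List Int), ([] : List Int))).1 ++
        (if k > 0 then lista.foldl (kmmStep k) ([], []) else (([] : List Int), ([] : List Int))).2 = _
      rw [if_neg (by omega)]
    rw [this]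
  · rw [kMinMax_alt_char lista k hk]
    have htake : ∀ (L : List Int), L.length = lista.length →
        L.take (if k > (lista.length : Int) then (lista.length : Int) else k).toNat = L.take k.toNat := by
      intro L hL
      split_ifs with h
      · rw [Int.toNat_natCast, List.take_of_length_le (by omega), List.take_of_length_le (by omega)]
      · rfl
    rw [htake S hS, htake S.reverse (by simpa using hS)]

-- ===== VERDICT (by name: the statement is the Claim_ definition above) =====
theorem kMinMax_spec : Claim_equal_kMinMax := by
  intro lista k _
  show kMinMax lista k = kMinMax_alt lista k
  exact kMinMax_eq_alt lista k
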